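-- pv_equiv track=rewrite | github.com/Computer-Vision-HCMUS/video-summarize | src/evaluation/keyshot.py | keyshots_to_ranges
-- ===== SOURCE A (Python) =====
-- from typing import List, Tuple
--
-- def keyshots_to_ranges(
--     keyframe_indices: List[int],
--     gap_threshold: int = 30,
-- ) -> List[Tuple[int, int]]:
--     """Giữ nguyên từ code cũ — dùng cho evaluation."""
--     if not keyframe_indices:
--         return []
--     indices = sorted(keyframe_indices)
--     ranges  = []
--     start   = indices[0]
--     end     = indices[0]
--     for i in indices[1:]:
--         if i - end <= gap_threshold:
--             end = i
--         else:
--             ranges.append((start, end + 1))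
--             start = i
--             end   = i
--     ranges.append((start, end + 1))
--     return ranges
-- ===== SOURCE B (Python) =====
-- def keyshots_to_ranges(keyframe_indices, gap_threshold=30):
--     """Segment recursion: find the first gap, emit that range, recurse on the rest."""
--     def go(xs):
--         for k in range(1, len(xs)):
--             if xs[k] - xs[k - 1] > gap_threshold:
--                 return [(xs[0], xs[k - 1] + 1)] + go(xs[k:])
--         return [(xs[0], xs[-1] + 1)]
--     if not keyframe_indices:
--         return []
--     return go(sorted(keyframe_indices))
-- ===== Notes on version B (the rewrite author's own statement) =====
-- stated objective: alternative
-- what changed: Replaces A's single accumulator loop carrying (ranges, start, end) state by a recursive decomposition: find the first over-threshold gap, emit that segment's range, and recurse on the remaining suffix.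
import Mathlib
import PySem

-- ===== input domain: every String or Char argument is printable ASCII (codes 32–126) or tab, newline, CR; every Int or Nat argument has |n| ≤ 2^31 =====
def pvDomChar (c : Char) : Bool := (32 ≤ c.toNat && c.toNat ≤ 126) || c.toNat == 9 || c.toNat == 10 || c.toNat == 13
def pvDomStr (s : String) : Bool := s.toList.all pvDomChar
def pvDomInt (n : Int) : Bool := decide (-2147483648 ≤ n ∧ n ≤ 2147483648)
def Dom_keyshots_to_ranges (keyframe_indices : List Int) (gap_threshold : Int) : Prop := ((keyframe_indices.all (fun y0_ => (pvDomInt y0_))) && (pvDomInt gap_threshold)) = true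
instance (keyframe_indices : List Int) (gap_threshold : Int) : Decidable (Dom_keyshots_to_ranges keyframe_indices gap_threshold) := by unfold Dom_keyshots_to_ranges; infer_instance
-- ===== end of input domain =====

-- B replaces A's single accumulator loop (ranges/start/end state) by a segment recursion:
-- find the first over-threshold gap, emit that range, recurse on the suffix. Objective: alternative decomposition.

-- ===== PORT A =====
-- the for-loop of A: state (ranges, start, end), iterated over indices[1:]
def pvLoopA (g : Int) : List Int → List (Int × Int) → Int → Int → (List (Int × Int) × Int × Int)
  | [], ranges, s, e => (ranges, s, e)
  | i :: rest, ranges, s, e =>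
    if i - e ≤ g then pvLoopA g rest ranges s i
    else pvLoopA g rest (ranges ++ [(s, e + 1)]) i i

def keyshots_to_ranges (keyframe_indices : List Int) (gap_threshold : Int) : List (Int × Int) :=
  if keyframe_indices = [] then []
  else
    match PySem.List.sorted keyframe_indices (fun x => x) false with
    | [] => []  -- unreachable: sorted of a nonempty list is nonempty (indices[0] exists)
    | h :: t =>
      let (ranges, s, e) := pvLoopA gap_threshold t [] h h
      ranges ++ [(s, e + 1)]

-- ===== PORT B =====
-- B's go(xs): scan for the first break against the previous element; on a break emit the
-- finished range and recurse on the suffix; if none, emit (xs[0], xs[-1]+1).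
def pvGoB (g : Int) : Int → Int → List Int → List (Int × Int)
  | first, prev, [] => [(first, prev + 1)]
  | first, prev, x :: rest =>
    if x - prev > g then (first, prev + 1) :: pvGoB g x x rest
    else pvGoB g first x rest

def keyshots_to_ranges_alt (keyframe_indices : List Int) (gap_threshold : Int) : List (Int × Int) :=
  if keyframe_indices = [] then []
  else
    match PySem.List.sorted keyframe_indices (fun x => x) false with
    | [] => []
    | h :: t => pvGoB gap_threshold h h t

-- ===== PRECONDITION & SPEC =====
def Spec_keyshots_to_ranges (keyframe_indices : List Int) (gap_threshold : Int) (out : List (Int × Int)) : Prop := out = keyshots_to_ranges_alt keyframe_indices gap_threshold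
instance (keyframe_indices : List Int) (gap_threshold : Int) (out : List (Int × Int)) : Decidable (Spec_keyshots_to_ranges keyframe_indices gap_threshold out) := by unfold Spec_keyshots_to_ranges; infer_instance

-- ===== CLAIM (what is proved, stated in full; the proofs are below) =====
def Claim_equal_keyshots_to_ranges : Prop := ∀ (keyframe_indices : List Int) (gap_threshold : Int), Dom_keyshots_to_ranges keyframe_indices gap_threshold → Spec_keyshots_to_ranges keyframe_indices gap_threshold (keyshots_to_ranges keyframe_indices gap_threshold)

-- ===== LEMMAS AND PROOFS =====

theorem pvLoopA_eq_goB (g : Int) (rest : List Int) :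
    ∀ (ranges : List (Int × Int)) (s e : Int),
      (pvLoopA g rest ranges s e).1 ++
        [((pvLoopA g rest ranges s e).2.1, (pvLoopA g rest ranges s e).2.2 + 1)]
        = ranges ++ pvGoB g s e rest := by
  induction rest with
  | nil => intro ranges s e; simp [pvLoopA, pvGoB]
  | cons i rest ih =>
    intro ranges s e
    simp only [pvLoopA, pvGoB]
    by_cases h : i - e ≤ g
    · rw [if_pos h, if_neg (by omega)]
      exact ih ranges s i
    · rw [if_neg h, if_pos (by omega)]
      rw [ih (ranges ++ [(s, e + 1)]) i i]; simp

-- ===== VERDICT (by name: the statement is the Claim_ definition above) =====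
theorem keyshots_to_ranges_spec : Claim_equal_keyshots_to_ranges := by
  intro ks g _
  unfold Spec_keyshots_to_ranges keyshots_to_ranges keyshots_to_ranges_alt
  by_cases hks : ks = []
  · simp [hks]
  · rw [if_neg hks, if_neg hks]
    cases h : PySem.List.sorted ks (fun x => x) false with
    | nil => rfl
    | cons m t =>
      simpa using pvLoopA_eq_goB g t [] m m
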